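-- pv_equiv track=rewrite | github.com/TUM-AIMED/LSI | mimic_experiments/junk/plot_scatterplot.py | limit_to_class
-- ===== SOURCE A (Python) =====
-- def limit_to_class(data, label, tar_label):
--     if tar_label == None:
--         return data
--     results = []
--     for each in data:
--         results_each = []
--         for (datapoint, lab) in zip(each, label):
--             if lab == tar_label:
--                 results_each.append(datapoint)
--         results.append(results_each)
--     return results
-- ===== SOURCE B (Python) =====
-- def limit_to_class(data, label, tar_label):
--     if tar_label is None:
--         return data
--     idx = [i for i, lab in enumerate(label) if lab == tar_label]
--     return [[each[i] for i in idx if i < len(each)] for each in data]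
-- ===== Notes on version B (the rewrite author's own statement) =====
-- stated objective: simpler
-- what changed: Compute the matching label indices once, then gather those positions from each row (guarded by the row length), instead of re-zipping and rescanning the label list for every row.
import Mathlib
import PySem

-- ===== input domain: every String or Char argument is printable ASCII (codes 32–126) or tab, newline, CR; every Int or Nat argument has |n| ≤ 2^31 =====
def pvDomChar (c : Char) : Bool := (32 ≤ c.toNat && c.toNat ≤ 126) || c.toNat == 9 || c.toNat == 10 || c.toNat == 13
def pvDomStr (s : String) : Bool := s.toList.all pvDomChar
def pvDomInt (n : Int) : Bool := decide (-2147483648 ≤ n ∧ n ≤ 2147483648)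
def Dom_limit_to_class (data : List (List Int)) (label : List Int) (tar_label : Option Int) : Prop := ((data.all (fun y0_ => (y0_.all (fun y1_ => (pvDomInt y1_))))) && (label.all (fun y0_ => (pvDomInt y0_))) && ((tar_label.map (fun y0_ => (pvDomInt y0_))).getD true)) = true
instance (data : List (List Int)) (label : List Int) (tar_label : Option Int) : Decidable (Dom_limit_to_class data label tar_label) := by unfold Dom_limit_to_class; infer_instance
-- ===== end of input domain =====

-- B computes the matching label indices once and gathers those positions from each row
-- (guarded by the row length), instead of re-zipping the row with the labels each time.

-- ===== PORT A =====
def limit_to_class (data : List (List Int)) (label : List Int) (tar_label : Option Int) : List (List Int) :=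
  match tar_label with
  | none => data
  | some t =>
    data.foldl (fun results each =>
      results ++ [(each.zip label).foldl (fun acc p => if p.2 == t then acc ++ [p.1] else acc) []]) []

-- ===== PORT B =====
def limit_to_class_alt (data : List (List Int)) (label : List Int) (tar_label : Option Int) : List (List Int) :=
  match tar_label with
  | none => data
  | some t =>
    let idx := ((PySem.List.enumerate label 0).filter (fun p => p.2 == t)).map (fun p => p.1)
    data.map (fun each =>
      (idx.filter (fun i => decide (i < (each.length : Int)))).map (fun i => each.getD i.toNat 0))

-- ===== PRECONDITION & SPEC =====
def Spec_limit_to_class (data : List (List Int)) (label : List Int) (tar_label : Option Int) (out : List (List Int)) : Prop := out = limit_to_class_alt data label tar_label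
instance (data : List (List Int)) (label : List Int) (tar_label : Option Int) (out : List (List Int)) : Decidable (Spec_limit_to_class data label tar_label out) := by unfold Spec_limit_to_class; infer_instance

-- ===== CLAIM (what is proved, stated in full; the proofs are below) =====
def Claim_equal_limit_to_class : Prop := ∀ (data : List (List Int)) (label : List Int) (tar_label : Option Int), Dom_limit_to_class data label tar_label → Spec_limit_to_class data label tar_label (limit_to_class data label tar_label)

-- ===== LEMMAS AND PROOFS =====

-- A's inner loop is filter-then-map.
theorem foldA_eq (t : Int) : ∀ (l : List (Int × Int)) (init : List Int),
    l.foldl (fun acc p => if p.2 == t then acc ++ [p.1] else acc) init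
      = init ++ (l.filter (fun p => p.2 == t)).map (fun p => p.1) := by
  intro l
  induction l with
  | nil => intro init; simp
  | cons hd tl ih =>
    intro init
    rw [List.foldl_cons, ih, List.filter_cons]
    by_cases h : hd.2 == t <;> simp [h]

-- A's outer loop is a map.
theorem foldOuter_eq (g : List Int → List Int) : ∀ (data init : List (List Int)),
    data.foldl (fun results each => results ++ [g each]) init = init ++ data.map g := by
  intro data
  induction data with
  | nil => intro init; simp
  | cons hd tl ih => intro init; simp [List.foldl_cons, ih]

-- every index produced from 'enumerate label s' is at least s
theorem enum_idx_ge (t : Int) (label : List Int) (s : Int) :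
    ∀ i ∈ ((PySem.List.enumerate label s).filter (fun p => p.2 == t)).map (fun p => p.1),
      s ≤ i := by
  intro i hi
  rcases List.mem_map.1 hi with ⟨p, hp, rfl⟩
  rcases (PySem.List.mem_enumerate_iff _ _ _).1 (List.mem_of_mem_filter hp) with ⟨k, hk, rfl⟩
  omega

-- row lemma, with general enumerate start s and row-length guard relative to s
theorem row_key (t : Int) : ∀ (label : List Int) (s : Nat) (each : List Int),
    ((each.zip label).filter (fun p => p.2 == t)).map (fun p => p.1)
      = (((((PySem.List.enumerate label (s : Int)).filter (fun p => p.2 == t)).map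
            (fun p => p.1)).filter (fun i => decide (i - (s:Int) < (each.length : Int)))).map
          (fun i => each.getD (i - (s:Int)).toNat 0)) := by
  intro label
  induction label with
  | nil => intro s each; simp [PySem.List.enumerate_nil]
  | cons l ls ih =>
    intro s each
    cases each with
    | nil =>
      simp only [List.zip_nil_left, List.filter_nil, List.map_nil]
      rw [List.filter_eq_nil_iff.2 ?_]
      · simp
      · intro i hi
        have := enum_idx_ge t (l :: ls) (s : Int) i hi
        simp only [List.length_nil, Int.natCast_zero, decide_eq_true_eq]
        omega
    | cons e es =>
      rw [PySem.List.enumerate_cons]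
      by_cases h : l == t
      · -- head index s is kept: guard s - s = 0 < len (e :: es) holds, getD 0 = e
        simp only [List.zip_cons_cons, List.filter_cons, h, if_pos, List.map_cons]
        rw [show ((s : Int) + 1) = ((s + 1 : Nat) : Int) by push_cast; ring] at *
        have tail :
            (((((PySem.List.enumerate ls ((s+1 : Nat) : Int)).filter (fun p => p.2 == t)).map
                (fun p => p.1)).filter (fun i => decide (i - (s:Int) < ((e :: es).length : Int)))).map
              (fun i => (e :: es).getD (i - (s:Int)).toNat 0))
            = (((((PySem.List.enumerate ls ((s+1 : Nat) : Int)).filter (fun p => p.2 == t)).map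
                (fun p => p.1)).filter (fun i => decide (i - ((s+1 : Nat):Int) < (es.length : Int)))).map
              (fun i => es.getD (i - ((s+1 : Nat):Int)).toNat 0)) := by
          rw [List.filter_congr ?_]
          · apply List.map_congr_left
            intro i hi
            have hge := enum_idx_ge t ls ((s+1 : Nat) : Int) i (List.mem_of_mem_filter hi)
            have : (i - (s:Int)).toNat = (i - ((s+1:Nat):Int)).toNat + 1 := by push_cast at hge ⊢; omega
            simp [this]
          · intro i hi
            have hge := enum_idx_ge t ls ((s+1 : Nat) : Int) i hi
            simp only [List.length_cons, decide_eq_decide]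
            push_cast at hge ⊢
            omega
        have hguard : decide ((s : Int) - (s : Int) < ((e :: es).length : Int)) = true := by
          simp
        simp only [hguard, if_pos, List.map_cons]
        have hhead : (e :: es).getD ((s : Int) - (s : Int)).toNat 0 = e := by simp
        rw [hhead, tail, ih (s+1) es]
      · simp only [List.zip_cons_cons, List.filter_cons, h]
        rw [show ((s : Int) + 1) = ((s + 1 : Nat) : Int) by push_cast; ring]
        have tail :
            (((((PySem.List.enumerate ls ((s+1 : Nat) : Int)).filter (fun p => p.2 == t)).map
                (fun p => p.1)).filter (fun i => decide (i - (s:Int) < ((e :: es).length : Int)))).map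
              (fun i => (e :: es).getD (i - (s:Int)).toNat 0))
            = (((((PySem.List.enumerate ls ((s+1 : Nat) : Int)).filter (fun p => p.2 == t)).map
                (fun p => p.1)).filter (fun i => decide (i - ((s+1 : Nat):Int) < (es.length : Int)))).map
              (fun i => es.getD (i - ((s+1 : Nat):Int)).toNat 0)) := by
          rw [List.filter_congr ?_]
          · apply List.map_congr_left
            intro i hi
            have hge := enum_idx_ge t ls ((s+1 : Nat) : Int) i (List.mem_of_mem_filter hi)
            have : (i - (s:Int)).toNat = (i - ((s+1:Nat):Int)).toNat + 1 := by push_cast at hge ⊢; omega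
            simp [this]
          · intro i hi
            have hge := enum_idx_ge t ls ((s+1 : Nat) : Int) i hi
            simp only [List.length_cons, decide_eq_decide]
            push_cast at hge ⊢
            omega
        simp only [Bool.false_eq_true, if_false]
        rw [tail, ih (s+1) es]

-- ===== VERDICT (by name: the statement is the Claim_ definition above) =====
theorem limit_to_class_spec : Claim_equal_limit_to_class := by
  intro data label tar_label _
  unfold Spec_limit_to_class limit_to_class limit_to_class_alt
  cases tar_label with
  | none => rfl
  | some t =>
    simp only
    rw [foldOuter_eq, List.nil_append]
    apply List.map_congr_left
    intro each _
    rw [foldA_eq, List.nil_append, row_key t label 0 each]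
    simp
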